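-- pv_equiv track=rewrite | github.com/Rajarshi1-source/Modern_Password_Manager01 | password_manager/security/services/dna_encoder.py | _break_homopolymers
-- ===== SOURCE A (Python) =====
-- MAX_HOMOPOLYMER_RUN = 4  # Max consecutive same nucleotides
--
-- def _break_homopolymers(sequence: str) -> str:
--     """
--     Insert spacer nucleotides to break long homopolymer runs.
--
--     Long runs of the same nucleotide are unstable during synthesis.
--     """
--     result = []
--     count = 1
--
--     for i, nucleotide in enumerate(sequence):
--         result.append(nucleotide)
--
--         if i > 0 and nucleotide == sequence[i-1]:
--             count += 1
--             if count >= MAX_HOMOPOLYMER_RUN: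
--                 # Insert marker for homopolymer break
--                 # Use opposite nucleotide as spacer
--                 spacer = 'G' if nucleotide in 'AT' else 'A'
--                 result.append(spacer)
--                 result.append('N')  # Marker for restoration
--                 count = 1
--         else:
--             count = 1
--
--     return ''.join(result)
-- ===== SOURCE B (Python) =====
-- MAX_HOMOPOLYMER_RUN = 4  # Max consecutive same nucleotides
--
--
-- def _break_homopolymers(sequence: str) -> str:
--     """Run-based rewrite: walk maximal runs of equal characters and emit
--     each run with a spacer+'N' pair after run positions 3, 6, 9, ..."""
--     out = []
--     n = len(sequence)
--     i = 0
--     while i < n: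
--         c = sequence[i]
--         j = i
--         while j < n and sequence[j] == c:
--             j += 1
--         spacer = 'G' if c in 'AT' else 'A'
--         for k in range(j - i):
--             out.append(c)
--             if k > 0 and k % 3 == 0:
--                 out.append(spacer)
--                 out.append('N')
--         i = j
--     return ''.join(out)
-- ===== Notes on version B (the rewrite author's own statement) =====
-- stated objective: alternative
-- what changed: B replaces A's per-character scan with a running counter and previous-character comparison by an outer walk over maximal runs of equal characters, emitting each run with a spacer-marker pair inserted after run positions 3, 6, 9, ...
import Mathlib
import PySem

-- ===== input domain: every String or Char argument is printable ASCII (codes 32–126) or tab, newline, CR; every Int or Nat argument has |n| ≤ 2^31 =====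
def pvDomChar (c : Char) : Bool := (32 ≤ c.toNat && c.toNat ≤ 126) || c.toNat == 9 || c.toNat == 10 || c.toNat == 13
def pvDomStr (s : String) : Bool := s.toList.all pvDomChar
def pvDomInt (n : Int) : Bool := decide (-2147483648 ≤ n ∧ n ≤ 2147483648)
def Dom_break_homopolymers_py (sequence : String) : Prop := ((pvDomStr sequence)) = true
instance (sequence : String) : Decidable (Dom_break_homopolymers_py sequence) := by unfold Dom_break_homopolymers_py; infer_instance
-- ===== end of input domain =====

-- B replaces A's per-character counter scan by a walk over maximal runs of equal
-- characters, emitting a spacer-marker pair after run positions 3, 6, 9, ... (objective: alternative).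

-- ===== PORT A =====
-- literal transliteration of A: fold over enumerate(sequence), state (result, count)
def break_homopolymers_py (sequence : String) : String :=
  let cs := sequence.toList
  let r := (PySem.List.enumerate cs 0).foldl
    (fun (st : List Char × Int) (p : Int × Char) =>
      let result := st.1 ++ [p.2]
      if p.1 > 0 ∧ PySem.List.pyGet? cs (p.1 - 1) = some p.2 then
        let count := st.2 + 1
        if count ≥ 4 then
          let spacer := if p.2 = 'A' ∨ p.2 = 'T' then 'G' else 'A'
          (result ++ [spacer, 'N'], 1)
        else (result, count)
      else (result, 1))
    ([], 1)
  String.mk r.1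

-- ===== PORT B =====
def spacerFor (c : Char) : Char := if c = 'A' ∨ c = 'T' then 'G' else 'A'

-- the inner 'for k in range(run length)' loop of Source B
def emitRun (c : Char) (len : Nat) : List Char :=
  (List.range len).foldl
    (fun acc k => acc ++ [c] ++ (if 0 < k ∧ k % 3 = 0 then [spacerFor c, 'N'] else [])) []

-- the outer while-loop of Source B: consume one maximal run per step
def altGo : List Char → List Char
  | [] => []
  | c :: rest =>
    emitRun c ((rest.takeWhile (· == c)).length + 1) ++ altGo (rest.dropWhile (· == c))
termination_by l => l.length
decreasing_by
  simp only [List.length_cons]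
  exact Nat.lt_succ_of_le (List.length_dropWhile_le _ _)

def break_homopolymers_py_alt (sequence : String) : String :=
  String.mk (altGo sequence.toList)

-- ===== PRECONDITION & SPEC =====
def Spec_break_homopolymers_py (sequence : String) (out : String) : Prop := out = break_homopolymers_py_alt sequence
instance (sequence : String) (out : String) : Decidable (Spec_break_homopolymers_py sequence out) := by unfold Spec_break_homopolymers_py; infer_instance

-- ===== CLAIM (what is proved, stated in full; the proofs are below) =====
def Claim_equal_break_homopolymers_py : Prop := ∀ (sequence : String), Dom_break_homopolymers_py sequence → Spec_break_homopolymers_py sequence (break_homopolymers_py sequence)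

-- ===== LEMMAS AND PROOFS =====

-- recursive characterization of A's fold: prev char (if any) and current counter
def aRec (prev : Option Char) (count : Int) : List Char → List Char
  | [] => []
  | c :: rest =>
    if prev = some c then
      if count + 1 ≥ 4 then c :: spacerFor c :: 'N' :: aRec (some c) 1 rest
      else c :: aRec (some c) (count + 1) rest
    else c :: aRec (some c) 1 rest

-- output pattern for the tail of a run: characters at run indices j, j+1, …, j+t-1 (j ≥ 1)
def pat (c : Char) (j t : Nat) : List Char :=
  match t with
  | 0 => []
  | t + 1 => c :: ((if j % 3 = 0 then [spacerFor c, 'N'] else []) ++ pat c (j + 1) t)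

theorem foldA (cs : List Char) (suf : List Char) : ∀ (k : Nat), suf = cs.drop k →
    ∀ (res : List Char) (count : Int),
    ((PySem.List.enumerate suf (k : Int)).foldl
      (fun (st : List Char × Int) (p : Int × Char) =>
        let result := st.1 ++ [p.2]
        if p.1 > 0 ∧ PySem.List.pyGet? cs (p.1 - 1) = some p.2 then
          let count := st.2 + 1
          if count ≥ 4 then
            let spacer := if p.2 = 'A' ∨ p.2 = 'T' then 'G' else 'A'
            (result ++ [spacer, 'N'], 1)
          else (result, count)
        else (result, 1))
      (res, count)).1
    = res ++ aRec (if k = 0 then none else cs[k-1]?) count suf := by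
  induction suf with
  | nil => intro k hk res count; simp [PySem.List.enumerate, aRec]
  | cons c rest ih =>
    intro k hk res count
    have hrest : rest = cs.drop (k + 1) := by
      have := congrArg List.tail hk
      simpa [List.tail_drop] using this
    have hget : cs[k]? = some c := by
      have : (cs.drop k).head? = some c := by rw [← hk]; simp
      simpa [List.head?_drop] using this
    have hk1 : ((k : Int) + 1) = ((k + 1 : Nat) : Int) := by push_cast; ring
    rw [PySem.List.enumerate_cons, List.foldl_cons, hk1]
    -- evaluate the step at (k, c) then apply ih at k+1
    have hcond : ((k : Int) > 0 ∧ PySem.List.pyGet? cs ((k : Int) - 1) = some c)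
        ↔ (if k = 0 then (none : Option Char) else cs[k-1]?) = some c := by
      rcases Nat.eq_zero_or_pos k with h0 | hpos
      · subst h0; simp
      · have hki : ((k : Int) - 1) = ((k - 1 : Nat) : Int) := by omega
        have hkpos : (k : Int) > 0 := by exact_mod_cast hpos
        rw [hki, PySem.List.pyGet?_natCast]
        simp [Nat.pos_iff_ne_zero.mp hpos]
        omega
    by_cases hc : (if k = 0 then (none : Option Char) else cs[k-1]?) = some c
    · have hc' : ((k : Int) > 0 ∧ PySem.List.pyGet? cs ((k : Int) - 1) = some c) := hcond.mpr hc
      by_cases h4 : count + 1 ≥ 4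
      · simp only [hc', h4]
        rw [ih (k + 1) hrest]
        simp [aRec, hc, h4, spacerFor, hget]
      · simp only [hc', h4]
        rw [ih (k + 1) hrest]
        simp [aRec, hc, h4, hget]
    · have hc' : ¬ ((k : Int) > 0 ∧ PySem.List.pyGet? cs ((k : Int) - 1) = some c) := fun h => hc (hcond.mp h)
      simp only [hc', if_false]
      rw [ih (k + 1) hrest]
      simp [aRec, hc, hget]

-- skipping a non-matching prev behaves like a fresh start
theorem aRec_reset (c : Char) (cnt : Int) (l : List Char) (h : l.head? ≠ some c) :
    aRec (some c) cnt l = aRec none 1 l := by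
  cases l with
  | nil => simp [aRec]
  | cons d r =>
    have : ¬ (some c = some d) := by
      intro he; apply h; simp at he; simp [he]
    simp [aRec, this]

-- the tail of a run of length t starting at run index j ≥ 1
theorem aRec_run (c : Char) : ∀ (t j : Nat), 1 ≤ j → ∀ (rest : List Char), rest.head? ≠ some c →
    aRec (some c) (((j - 1) % 3 : Nat) + 1) (List.replicate t c ++ rest)
      = pat c j t ++ aRec none 1 rest := by
  intro t
  induction t with
  | zero => intro j hj rest hr; simpa [pat] using aRec_reset c _ rest hr
  | succ t ih =>
    intro j hj rest hr
    rw [List.replicate_succ, List.cons_append]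
    by_cases h3 : j % 3 = 0
    · have h4 : ((((j - 1) % 3 : Nat) : Int) + 1) + 1 ≥ 4 := by
        have : (j - 1) % 3 = 2 := by omega
        rw [this]; norm_num
      have hnext : (1 : Int) = ((((j + 1) - 1) % 3 : Nat) : Int) + 1 := by
        have : ((j + 1) - 1) % 3 = 0 := by omega
        rw [this]; norm_num
      simp only [aRec, if_pos h4]
      rw [hnext, ih (j + 1) (by omega) rest hr]
      simp [pat, h3]
    · have h4 : ¬ ((((j - 1) % 3 : Nat) : Int) + 1) + 1 ≥ 4 := by
        have : (j - 1) % 3 < 2 := by omega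
        omega
      have hnext : ((((j - 1) % 3 : Nat) : Int) + 1) + 1 = ((((j + 1) - 1) % 3 : Nat) : Int) + 1 := by
        have : ((j + 1) - 1) % 3 = (j - 1) % 3 + 1 := by omega
        rw [this]; push_cast; ring
      simp only [aRec, if_neg h4]
      rw [hnext, ih (j + 1) (by omega) rest hr]
      simp [pat, h3]

-- Source B's inner loop produces c followed by the run-tail pattern
theorem emitRun_eq_pat (c : Char) (m : Nat) : emitRun c (m + 1) = c :: pat c 1 m := by
  have flat : ∀ (n : Nat) (acc : List Char), (List.range' n m).foldl
      (fun acc k => acc ++ [c] ++ (if 0 < k ∧ k % 3 = 0 then [spacerFor c, 'N'] else [])) acc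
      = acc ++ (List.range' n m).flatMap
          (fun k => [c] ++ (if 0 < k ∧ k % 3 = 0 then [spacerFor c, 'N'] else [])) := by
    intro n acc
    rw [show (fun (acc : List Char) k => acc ++ [c] ++ (if 0 < k ∧ k % 3 = 0 then [spacerFor c, 'N'] else []))
        = (fun acc k => acc ++ ([c] ++ (if 0 < k ∧ k % 3 = 0 then [spacerFor c, 'N'] else []))) from
      funext fun a => funext fun k => by rw [List.append_assoc]]
    exact PySem.List.foldl_append_eq_flatMap _ _ _
  have hpat : ∀ (t j : Nat), 1 ≤ j →
      (List.range' j t).flatMap (fun k => [c] ++ (if 0 < k ∧ k % 3 = 0 then [spacerFor c, 'N'] else []))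
        = pat c j t := by
    intro t
    induction t with
    | zero => intro j hj; simp [pat]
    | succ t ih =>
      intro j hj
      rw [List.range'_succ, List.flatMap_cons, ih (j + 1) (by omega)]
      by_cases h3 : j % 3 = 0
      · simp [pat, h3, Nat.lt_of_lt_of_le Nat.zero_lt_one hj]
      · simp [pat, h3]
  unfold emitRun
  rw [List.range_eq_range', List.range'_succ, List.foldl_cons]
  simp only []
  rw [flat 1 _, hpat m 1 (le_refl 1)]
  norm_num

theorem aRec_eq_altGo : ∀ (cs : List Char), aRec none 1 cs = altGo cs := by
  intro cs
  induction cs using altGo.induct with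
  | case1 => simp [aRec, altGo]
  | case2 c rest ih =>
    have hsplit : rest = rest.takeWhile (· == c) ++ rest.dropWhile (· == c) :=
      (List.takeWhile_append_dropWhile).symm
    have hrepl : rest.takeWhile (· == c) = List.replicate (rest.takeWhile (· == c)).length c := by
      apply List.eq_replicate_of_mem
      intro b hb
      have hbc := List.mem_takeWhile_imp hb
      exact eq_of_beq hbc
    have hhead : (rest.dropWhile (· == c)).head? ≠ some c := by
      intro h
      have hne : rest.dropWhile (· == c) ≠ [] := by intro hnil; simp [hnil] at h
      have h2 := List.head_dropWhile_not (· == c) hne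
      rw [List.head?_eq_head hne] at h
      simp only [Option.some.injEq] at h
      simp [h] at h2
    have h1 : aRec none 1 (c :: rest) = c :: aRec (some c) 1 rest := by
      simp [aRec]
    rw [h1]
    conv_lhs => rw [hsplit, hrepl]
    have := aRec_run c (rest.takeWhile (· == c)).length 1 (le_refl 1) (rest.dropWhile (· == c)) hhead
    simp only [show ((1 - 1) % 3 : Nat) = 0 from rfl, Nat.cast_zero, zero_add] at this
    rw [this, ih, altGo, emitRun_eq_pat]
    simp

-- ===== VERDICT (by name: the statement is the Claim_ definition above) =====
theorem break_homopolymers_py_spec : Claim_equal_break_homopolymers_py := by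
  intro sequence _
  unfold Spec_break_homopolymers_py
  have h := foldA sequence.toList sequence.toList 0 rfl [] 1
  simp only [Nat.cast_zero, reduceIte, List.nil_append, aRec_eq_altGo] at h
  show String.mk
      ((PySem.List.enumerate sequence.toList 0).foldl
        (fun (st : List Char × Int) (p : Int × Char) =>
          if p.1 > 0 ∧ PySem.List.pyGet? sequence.toList (p.1 - 1) = some p.2 then
            if st.2 + 1 ≥ 4 then
              (st.1 ++ [p.2] ++ [if p.2 = 'A' ∨ p.2 = 'T' then 'G' else 'A', 'N'], 1)
            else (st.1 ++ [p.2], st.2 + 1)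
          else (st.1 ++ [p.2], 1))
        ([], 1)).1
    = String.mk (altGo sequence.toList)
  rw [h]
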